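-- pv_equiv track=rewrite | github.com/deHoop/Shuffle-Permutation-Generators-and-Utilities | partition.py | partitionFactors
-- ===== SOURCE A (Python) =====
-- def partitionFactors(primeFactors):
--     #a number with 1 (prime) factor only has 1 factorization
--     if len(primeFactors) == 1:
--         return [primeFactors]
--     number = primeFactors[0]
--     factorList = []
--     parts = partitionFactors(primeFactors[1:])
--     #for each possible factorization of primeFactors[1:] we will either add primeFactors[0] as a seperate new factor or add it to an already existing factor
--     for part in parts:
--         for n, factor in enumerate(part):
--             #add the first number to all possible factors
--             res = sorted(part[:n] +  [number * factor] + part[n+1:])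
--             if res not in factorList:
--                 factorList.append(res)
--         #add the first number as a new factor
--         res = sorted([number] + part)
--         if res not in factorList:
--             factorList.append( res )
--     return sorted(factorList)
-- ===== SOURCE B (Python) =====
-- def partitionFactors(primeFactors):
--     # Iterative fold instead of recursion: seed from the last prime and fold the
--     # remaining primes back-to-front, keeping each generation sorted & deduped.
--     result = [[primeFactors[-1]]]
--     for p in reversed(primeFactors[:-1]):
--         nxt = []
--         for part in result:
--             cands = [sorted(part[:i] + [p * part[i]] + part[i + 1:])
--                      for i in range(len(part))]
--             cands.append(sorted([p] + part))
--             for c in cands: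
--                 if c not in nxt:
--                     nxt.append(c)
--         result = sorted(nxt)
--     return result
-- ===== Notes on version B (the rewrite author's own statement) =====
-- stated objective: alternative
-- what changed: Replaced A's head-recursion with an iterative fold that seeds the partition list from the last prime and folds the remaining primes back-to-front, building each part's candidate list in one comprehension before a single dedup pass.
import Mathlib
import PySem

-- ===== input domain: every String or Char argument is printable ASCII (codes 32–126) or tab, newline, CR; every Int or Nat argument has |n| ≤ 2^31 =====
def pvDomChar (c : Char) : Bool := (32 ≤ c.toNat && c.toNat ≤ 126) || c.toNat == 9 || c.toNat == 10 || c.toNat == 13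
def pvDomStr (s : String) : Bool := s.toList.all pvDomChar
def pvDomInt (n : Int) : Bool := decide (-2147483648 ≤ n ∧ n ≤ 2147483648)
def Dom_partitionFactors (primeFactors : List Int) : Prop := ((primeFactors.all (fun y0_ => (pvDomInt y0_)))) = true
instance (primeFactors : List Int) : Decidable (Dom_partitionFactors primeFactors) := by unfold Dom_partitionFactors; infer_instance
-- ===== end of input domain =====

-- B replaces A's recursion by an iterative fold over the primes (seeded from the last one),
-- generating each part's candidates as one list before deduplicating: objective 'alternative'.
-- Both A and B raise IndexError on the empty list; Pre_ excludes it.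


-- ===== PORT A =====
-- Literal port of A's recursion. On [] Python raises IndexError (primeFactors[0]); that
-- input is excluded by Pre_, the port returns [] there as a junk value.
-- part[:n] / part[n+1:] are ported as take/drop: n is an enumerate index, always in range.
def partitionFactors : List Int → List (List Int)
  | [] => []
  | [x] => [[x]]
  | number :: rest =>
      let parts := partitionFactors rest
      let factorList := parts.foldl (fun factorList part =>
        let factorList := (PySem.List.enumerate part).foldl (fun factorList nf =>
          let n := nf.1.toNat
          let res := PySem.List.sorted
            (part.take n ++ [number * nf.2] ++ part.drop (n + 1)) (fun x => x) false
          if res ∈ factorList then factorList else factorList ++ [res]) factorList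
        let res := PySem.List.sorted (number :: part) (fun x => x) false
        if res ∈ factorList then factorList else factorList ++ [res]) []
      PySem.List.sorted factorList (fun x => x) false

-- ===== PORT B =====
-- Literal port of Source B. primeFactors[-1] raises IndexError on []; excluded by Pre_,
-- the port returns [] there. part[i] for i in range(len(part)) is in range: getD is exact.
def partitionFactors_alt (primeFactors : List Int) : List (List Int) :=
  match primeFactors.getLast? with
  | none => []
  | some lastP =>
      (primeFactors.dropLast.reverse).foldl (fun result p =>
        let nxt := result.foldl (fun nxt part =>
          let cands := (List.range part.length).map (fun i =>
            PySem.List.sorted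
              (part.take i ++ [p * part.getD i 0] ++ part.drop (i + 1)) (fun x => x) false)
          let cands := cands ++ [PySem.List.sorted (p :: part) (fun x => x) false]
          cands.foldl (fun nxt c => if c ∈ nxt then nxt else nxt ++ [c]) nxt) []
        PySem.List.sorted nxt (fun x => x) false) [[lastP]]

-- ===== PRECONDITION & SPEC =====
-- Pre_ excludes only the empty list, on which the Python A raises IndexError (primeFactors[0]).
def Pre_partitionFactors (primeFactors : List Int) : Prop := primeFactors ≠ []
instance (primeFactors : List Int) : Decidable (Pre_partitionFactors primeFactors) := by
  unfold Pre_partitionFactors; infer_instance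

def pvWitness_partitionFactors : List Int := [2, 3, 5]

def Spec_partitionFactors (primeFactors : List Int) (out : List (List Int)) : Prop :=
  out = partitionFactors_alt primeFactors
instance (primeFactors : List Int) (out : List (List Int)) :
    Decidable (Spec_partitionFactors primeFactors out) := by
  unfold Spec_partitionFactors; infer_instance

-- ===== CLAIM =====
def Claim_equal_partitionFactors : Prop :=
  ∀ (primeFactors : List Int), Dom_partitionFactors primeFactors →
    Pre_partitionFactors primeFactors →
    Spec_partitionFactors primeFactors (partitionFactors primeFactors)

-- ===== LEMMAS AND PROOFS =====

-- B's per-prime step, named for the proofs (identical to the lambda in partitionFactors_alt).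
def pvStepB (result : List (List Int)) (p : Int) : List (List Int) :=
  let nxt := result.foldl (fun nxt part =>
    let cands := (List.range part.length).map (fun i =>
      PySem.List.sorted
        (part.take i ++ [p * part.getD i 0] ++ part.drop (i + 1)) (fun x => x) false)
    let cands := cands ++ [PySem.List.sorted (p :: part) (fun x => x) false]
    cands.foldl (fun nxt c => if c ∈ nxt then nxt else nxt ++ [c]) nxt) []
  PySem.List.sorted nxt (fun x => x) false

theorem pvAlt_eq_foldl (pf : List Int) (l : Int) (h : pf.getLast? = some l) :
    partitionFactors_alt pf = (pf.dropLast.reverse).foldl pvStepB [[l]] := by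
  unfold partitionFactors_alt
  rw [h]
  rfl

theorem pvEnum_eq_map (part : List Int) :
    PySem.List.enumerate part 0
      = (List.range part.length).map (fun (i : Nat) => ((i : Int), part.getD i 0)) := by
  apply List.ext_getElem
  · simp [PySem.List.length_enumerate]
  · intro k h1 h2
    have hk : k < part.length := by
      simpa [PySem.List.length_enumerate] using h1
    simp [PySem.List.getElem_enumerate, List.getElem?_eq_getElem hk]

-- A's per-part inner loop equals B's candidate-list fold.
theorem pvInner_eq (number : Int) (part : List Int) (acc : List (List Int)) :
    (let fl := (PySem.List.enumerate part).foldl (fun fl nf =>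
        let n := nf.1.toNat
        let res := PySem.List.sorted
          (part.take n ++ [number * nf.2] ++ part.drop (n + 1)) (fun x => x) false
        if res ∈ fl then fl else fl ++ [res]) acc
      let res := PySem.List.sorted (number :: part) (fun x => x) false
      if res ∈ fl then fl else fl ++ [res])
    = (((List.range part.length).map (fun i =>
          PySem.List.sorted
            (part.take i ++ [number * part.getD i 0] ++ part.drop (i + 1)) (fun x => x) false))
        ++ [PySem.List.sorted (number :: part) (fun x => x) false]).foldl
          (fun nxt c => if c ∈ nxt then nxt else nxt ++ [c]) acc := by
  rw [pvEnum_eq_map, List.foldl_append, List.foldl_map, List.foldl_map]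
  simp

-- A's whole cons-level body equals B's step.
theorem pvBody_eq (number : Int) (parts : List (List Int)) :
    PySem.List.sorted (parts.foldl (fun factorList part =>
        let factorList := (PySem.List.enumerate part).foldl (fun factorList nf =>
          let n := nf.1.toNat
          let res := PySem.List.sorted
            (part.take n ++ [number * nf.2] ++ part.drop (n + 1)) (fun x => x) false
          if res ∈ factorList then factorList else factorList ++ [res]) factorList
        let res := PySem.List.sorted (number :: part) (fun x => x) false
        if res ∈ factorList then factorList else factorList ++ [res]) []) (fun x => x) false
    = pvStepB parts number := by
  unfold pvStepB
  congr 1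
  congr 1
  funext fl part
  exact pvInner_eq number part fl

theorem pvMain (pf : List Int) (h : pf ≠ []) :
    partitionFactors pf = partitionFactors_alt pf := by
  induction pf with
  | nil => exact absurd rfl h
  | cons a tail ih =>
    cases tail with
    | nil => rfl
    | cons b t =>
      obtain ⟨l, hl⟩ : ∃ l, (b :: t).getLast? = some l := by
        cases hx : (b :: t).getLast? with
        | none => simp at hx
        | some l => exact ⟨l, rfl⟩
      have hA : partitionFactors (a :: b :: t)
          = pvStepB (partitionFactors (b :: t)) a := by
        rw [partitionFactors]
        · exact pvBody_eq a (partitionFactors (b :: t))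
        · simp
      have hB : partitionFactors_alt (a :: b :: t)
          = pvStepB (partitionFactors_alt (b :: t)) a := by
        rw [pvAlt_eq_foldl (a :: b :: t) l (by rw [List.getLast?_cons_cons]; exact hl),
            pvAlt_eq_foldl (b :: t) l hl]
        simp [List.foldl_append]
      rw [hA, ih (by simp), hB]

-- ===== VERDICT =====
theorem partitionFactors_spec : Claim_equal_partitionFactors := by
  intro pf _ hpre
  exact pvMain pf hpre
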